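-- pv_equiv track=rewrite | github.com/MUBENDIRAN/Cloud-Insight-AI | src/json_report_generator.py | _determine_cost_health
-- ===== SOURCE A (Python) =====
-- def _determine_cost_health(cost_summary, alerts):
--     """Determine cost health"""
--     cost_alerts = [a for a in alerts if a.get('category') == 'cost']
--
--     if len(cost_alerts) > 0:
--         severities = [a.get('severity') for a in cost_alerts]
--         if 'critical' in severities:
--             return "critical"
--         elif 'high' in severities:
--             return "warning"
--
--     return "normal"
-- ===== SOURCE B (Python) =====
-- _RANK = {'critical': 2, 'high': 1}
-- _LEVELS = ('normal', 'warning', 'critical')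
--
-- def _determine_cost_health(cost_summary, alerts):
--     """Cost health as the maximum numeric severity rank of cost alerts."""
--     score = max((_RANK.get(a.get('severity'), 0)
--                  for a in alerts if a.get('category') == 'cost'),
--                 default=0)
--     return _LEVELS[score]
-- ===== Notes on version B (the rewrite author's own statement) =====
-- stated objective: alternative
-- what changed: Replaces the filter-then-membership-tests logic with a numeric severity lattice: each cost alert's severity is mapped to a rank (critical=2, high=1, other=0), the maximum rank is folded over the alerts, and the health string is read from a level table.
import Mathlib
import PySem

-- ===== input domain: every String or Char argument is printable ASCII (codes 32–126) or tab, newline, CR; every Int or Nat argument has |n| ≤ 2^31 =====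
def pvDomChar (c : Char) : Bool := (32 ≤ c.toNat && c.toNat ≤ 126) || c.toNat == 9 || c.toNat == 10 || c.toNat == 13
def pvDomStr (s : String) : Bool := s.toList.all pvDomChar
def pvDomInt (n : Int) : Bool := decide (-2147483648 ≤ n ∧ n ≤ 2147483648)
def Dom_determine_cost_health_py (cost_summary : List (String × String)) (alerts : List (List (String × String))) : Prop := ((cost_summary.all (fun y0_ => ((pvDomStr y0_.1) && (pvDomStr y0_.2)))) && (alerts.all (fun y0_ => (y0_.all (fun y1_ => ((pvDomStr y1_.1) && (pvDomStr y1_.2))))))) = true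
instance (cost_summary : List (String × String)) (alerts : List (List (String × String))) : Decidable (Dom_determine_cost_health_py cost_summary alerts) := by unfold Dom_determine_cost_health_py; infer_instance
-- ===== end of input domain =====

-- B replaces A's filter-then-membership-tests with a numeric severity lattice: max rank
-- (critical=2, high=1, other=0) over cost alerts, then a level-table lookup; same value everywhere.

-- dict.get(k): first match in the association list (exact for Python dicts, whose keys are unique)
def pyDictGet (d : List (String × String)) (k : String) : Option String :=
  (d.find? (fun p => p.1 == k)).map (·.2)

-- ===== PORT A =====
def determine_cost_health_py (cost_summary : List (String × String)) (alerts : List (List (String × String))) : String :=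
  let cost_alerts := alerts.filter (fun a => pyDictGet a "category" == some "cost")
  if cost_alerts.length > 0 then
    let severities := cost_alerts.map (fun a => pyDictGet a "severity")
    if severities.contains (some "critical") then "critical"
    else if severities.contains (some "high") then "warning"
    else "normal"
  else "normal"

-- ===== PORT B =====
-- _RANK.get(sev, 0): association-list lookup with default 0
def rankOf (sev : Option String) : Nat :=
  if sev == some "critical" then 2 else if sev == some "high" then 1 else 0

def levelsB : List String := ["normal", "warning", "critical"]

-- max(gen, default=0): a left fold of max over the filtered generator
def scoreFold (alerts : List (List (String × String))) (s : Nat) : Nat :=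
  alerts.foldl
    (fun s a => if pyDictGet a "category" == some "cost"
                then max s (rankOf (pyDictGet a "severity")) else s) s

def determine_cost_health_py_alt (cost_summary : List (String × String)) (alerts : List (List (String × String))) : String :=
  -- _LEVELS[score]: tuple indexing; score ≤ 2 by construction, so it never raises and the
  -- getD default is unreachable
  (PySem.List.pyGet? levelsB (Int.ofNat (scoreFold alerts 0))).getD "normal"

-- ===== PRECONDITION & SPEC =====
def Spec_determine_cost_health_py (cost_summary : List (String × String)) (alerts : List (List (String × String))) (out : String) : Prop := out = determine_cost_health_py_alt cost_summary alerts
instance (cost_summary : List (String × String)) (alerts : List (List (String × String))) (out : String) : Decidable (Spec_determine_cost_health_py cost_summary alerts out) := by unfold Spec_determine_cost_health_py; infer_instance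

-- ===== CLAIM (what is proved, stated in full; the proofs are below) =====
def Claim_equal_determine_cost_health_py : Prop := ∀ (cost_summary : List (String × String)) (alerts : List (List (String × String))), Dom_determine_cost_health_py cost_summary alerts → Spec_determine_cost_health_py cost_summary alerts (determine_cost_health_py cost_summary alerts)

-- ===== LEMMAS AND PROOFS =====

-- A's membership-test classification, as a number.
def classify (sev : List (Option String)) : Nat :=
  if sev.contains (some "critical") then 2 else if sev.contains (some "high") then 1 else 0

theorem classify_cons (x : Option String) (l : List (Option String)) :
    classify (x :: l) = max (rankOf x) (classify l) := by
  simp only [classify, rankOf, List.contains_cons, beq_iff_eq, Bool.or_eq_true]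
  by_cases h1 : x = some "critical" <;> by_cases h2 : x = some "high" <;>
    simp [h1, h2, eq_comm] <;> split_ifs <;> omega

-- The max-fold computes max of the accumulator with the classification of the severities
-- of the cost alerts.
theorem scoreFold_eq (alerts : List (List (String × String))) (s : Nat) :
    scoreFold alerts s =
      max s (classify ((alerts.filter (fun a => pyDictGet a "category" == some "cost")).map
          (fun a => pyDictGet a "severity"))) := by
  induction alerts generalizing s with
  | nil => simp [scoreFold, classify]
  | cons a rest ih =>
    simp only [scoreFold, List.foldl_cons] at *
    by_cases hc : (pyDictGet a "category" == some "cost") = true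
    · rw [List.filter_cons_of_pos (p := fun a => pyDictGet a "category" == some "cost") hc]
      simp only [hc, if_true, ih, List.map_cons, classify_cons]
      omega
    · have hcb : (pyDictGet a "category" == some "cost") = false := by simpa using hc
      rw [List.filter_cons_of_neg (p := fun a => pyDictGet a "category" == some "cost")
        (by simp [hcb])]
      rw [hcb]
      simp only [Bool.false_eq_true, if_false]
      exact ih s

-- ===== VERDICT (by name: the statement is the Claim_ definition above) =====
theorem determine_cost_health_py_spec : Claim_equal_determine_cost_health_py := by
  intro cost_summary alerts _
  show determine_cost_health_py cost_summary alerts = determine_cost_health_py_alt cost_summary alerts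
  rw [determine_cost_health_py_alt, scoreFold_eq]
  simp only [determine_cost_health_py, classify, Nat.zero_max]
  set fl := alerts.filter (fun a => pyDictGet a "category" == some "cost") with hfl
  set sev := fl.map (fun a => pyDictGet a "severity") with hsev
  by_cases hcrit : sev.contains (some "critical") = true
  · have hne : fl ≠ [] := by
      intro h; rw [hsev, h] at hcrit; simp at hcrit
    simp only [if_pos (List.length_pos_iff.mpr hne), if_pos hcrit]; decide
  · by_cases hhigh : sev.contains (some "high") = true
    · have hne : fl ≠ [] := by
        intro h; rw [hsev, h] at hhigh; simp at hhigh
      simp only [if_pos (List.length_pos_iff.mpr hne), if_neg hcrit, if_pos hhigh]; decide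
    · simp only [if_neg hcrit, if_neg hhigh]
      by_cases hlen : fl.length > 0
      · simp only [if_pos hlen]; decide
      · simp only [if_neg hlen]; decide
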